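-- pv_equiv track=rewrite | github.com/samikprakash/Assembler | assembler.py | address_to_variable
-- ===== SOURCE A (Python) =====
-- def address_to_variable(symbol_table,ilc): #gives address to the variables in the variable table
-- 	jump = 0
-- 	for x in symbol_table:
-- 		if symbol_table[x] == "na":
-- 			symbol_table[x] = ilc + 1 #word size is 1 bits
-- 			ilc = ilc+1
-- 			jump += 1
-- 	return jump
-- ===== SOURCE B (Python) =====
-- def address_to_variable(symbol_table, ilc):
--     # total jump count first, via a value count; then walk the dict BACKWARDS,
--     # handing out addresses counting DOWN from the top address ilc + total
--     total = list(symbol_table.values()).count("na")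
--     nxt = ilc + total
--     for k in reversed(symbol_table):
--         if symbol_table[k] == "na":
--             symbol_table[k] = nxt
--             nxt -= 1
--     return total
-- ===== Notes on version B (the rewrite author's own statement) =====
-- stated objective: alternative
-- what changed: B computes the jump count up front by counting "na" values, then traverses the dict in REVERSE handing out addresses counting down from ilc+total, instead of a forward pass threading ilc/jump accumulators upward.
import Mathlib
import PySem

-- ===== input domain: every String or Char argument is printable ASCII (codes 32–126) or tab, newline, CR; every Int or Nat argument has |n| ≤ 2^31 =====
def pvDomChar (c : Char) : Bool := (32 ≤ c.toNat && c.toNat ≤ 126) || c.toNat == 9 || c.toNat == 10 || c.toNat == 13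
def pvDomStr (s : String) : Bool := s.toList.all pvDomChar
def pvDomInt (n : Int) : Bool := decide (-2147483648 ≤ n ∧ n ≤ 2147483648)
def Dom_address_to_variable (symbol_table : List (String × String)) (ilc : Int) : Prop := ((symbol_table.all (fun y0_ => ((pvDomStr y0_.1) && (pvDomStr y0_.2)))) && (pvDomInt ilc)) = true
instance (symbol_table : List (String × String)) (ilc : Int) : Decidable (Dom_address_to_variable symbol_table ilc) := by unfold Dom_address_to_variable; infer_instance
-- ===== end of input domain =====

-- B computes the jump count up front by counting "na" values, then walks the dict in reverse
-- handing out addresses counting down from ilc+total (objective: alternative, same O(n) cost;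
-- equivalence is about the RETURN value — both versions mutate the dict in place identically).


-- ===== PORT A =====
-- the 'for x in symbol_table' loop: iterate over the keys, threading the mutated dict,
-- ilc and jump; the int written by 'symbol_table[x] = ilc + 1' is stored via toStr — it is
-- never read again (each key is looked up before it is written, keys of a dict are unique),
-- so the representation does not affect the returned jump
def addrLoopA (t : PySem.Dict String String) (keys : List String) (ilc jump : Int) : Int :=
  match keys with
  | [] => jump
  | x :: xs =>
      if t.getD x "" == "na" then
        addrLoopA (t.insert x (PySem.Int.toStr (ilc + 1))) xs (ilc + 1) (jump + 1)
      else
        addrLoopA t xs ilc jump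

def address_to_variable (symbol_table : List (String × String)) (ilc : Int) : Int :=
  let d := PySem.Dict.ofList symbol_table
  addrLoopA d d.keys ilc 0

-- ===== PORT B =====
def address_to_variable_alt (symbol_table : List (String × String)) (ilc : Int) : Int :=
  let d := PySem.Dict.ofList symbol_table
  let total : Int := (PySem.List.count d.values "na" : Int)
  -- the reversed count-down write loop (mutation only; the return value is total)
  let _state := d.keys.reverse.foldl
      (fun (p : PySem.Dict String String × Int) k =>
        if p.1.getD k "" == "na" then (p.1.insert k (PySem.Int.toStr p.2), p.2 - 1)
        else p)
      (d, ilc + total)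
  total

-- ===== PRECONDITION & SPEC =====
def Spec_address_to_variable (symbol_table : List (String × String)) (ilc : Int) (out : Int) : Prop := out = address_to_variable_alt symbol_table ilc
instance (symbol_table : List (String × String)) (ilc : Int) (out : Int) : Decidable (Spec_address_to_variable symbol_table ilc out) := by unfold Spec_address_to_variable; infer_instance

-- ===== CLAIM =====
def Claim_equal_address_to_variable : Prop := ∀ (symbol_table : List (String × String)) (ilc : Int), Dom_address_to_variable symbol_table ilc → Spec_address_to_variable symbol_table ilc (address_to_variable symbol_table ilc)

-- ===== LEMMAS AND PROOFS =====

-- A's loop counts the keys whose CURRENT value is "na"; the writes never touch a key that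
-- is still to be looked up (keys are Nodup), so the count is over the incoming table.
theorem addrLoopA_count (keys : List String) :
    ∀ (t : PySem.Dict String String) (ilc jump : Int), keys.Nodup →
      addrLoopA t keys ilc jump
        = jump + ((keys.filter (fun x => t.getD x "" == "na")).length : Int) := by
  induction keys with
  | nil => intro t ilc jump _; simp [addrLoopA]
  | cons x xs ih =>
      intro t ilc jump hnd
      have hx : x ∉ xs := (List.nodup_cons.mp hnd).1
      have hxs : xs.Nodup := (List.nodup_cons.mp hnd).2
      by_cases h : t.getD x "" == "na"
      · have hfc : xs.filter (fun y => (t.insert x (PySem.Int.toStr (ilc + 1))).getD y "" == "na")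
            = xs.filter (fun y => t.getD y "" == "na") := by
          apply List.filter_congr
          intro y hy
          have hne : y ≠ x := fun e => hx (e ▸ hy)
          rw [PySem.Dict.getD_insert]
          simp [hne]
        rw [addrLoopA, if_pos h, ih _ _ _ hxs, hfc]
        simp [h]
        omega
      · rw [addrLoopA, if_neg h, ih _ _ _ hxs]
        simp [h]

-- ===== VERDICT =====
theorem address_to_variable_spec : Claim_equal_address_to_variable := by
  intro symbol_table ilc _
  unfold Spec_address_to_variable address_to_variable address_to_variable_alt
  set d := PySem.Dict.ofList symbol_table with hd
  have hnd : d.keys.Nodup := PySem.Dict.nodup_keys_ofList symbol_table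
  rw [addrLoopA_count d.keys d ilc 0 hnd]
  have hval : d.values = d.keys.map (fun k => d.getD k "") :=
    PySem.Dict.values_eq_map_keys d hnd ""
  simp only [hval, PySem.List.count_eq, List.count_eq_countP, List.countP_map,
    Function.comp_def]
  simp [List.countP_eq_length_filter]
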